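-- pv_equiv track=rewrite | github.com/euihyeok-song/codingStudy | 프로그래머스/2/138476. 귤 고르기/귤 고르기.py | solution
-- ===== SOURCE A (Python) =====
-- from collections import Counter
--
-- def solution(k, tangerine):
--     count = Counter(tangerine)
--     sizes = sorted(count.values(), reverse=True)
--
--     total = 0
--     answer = 0
--     for size in sizes:
--         total += size
--         answer += 1
--         if total >= k:
--             break
--
--     return answer
-- ===== SOURCE B (Python) =====
-- def solution(k, tangerine):
--     count = {}
--     for t in tangerine:
--         count[t] = count.get(t, 0) + 1
--     if not count:
--         return 0
--     buckets = {}
--     for c in count.values():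
--         buckets[c] = buckets.get(c, 0) + 1
--     total = 0
--     answer = 0
--     for f in range(max(count.values()), 0, -1):
--         for _ in range(buckets.get(f, 0)):
--             total += f
--             answer += 1
--             if total >= k:
--                 return answer
--     return answer
-- ===== Notes on version B (the rewrite author's own statement) =====
-- stated objective: alternative
-- what changed: Replaces sorted(count.values(), reverse=True) + greedy scan by a counting-sort-style pass: a frequency-of-frequencies table is built and traversed from the maximum frequency downwards, with an early return once the basket is full.
import Mathlib
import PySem

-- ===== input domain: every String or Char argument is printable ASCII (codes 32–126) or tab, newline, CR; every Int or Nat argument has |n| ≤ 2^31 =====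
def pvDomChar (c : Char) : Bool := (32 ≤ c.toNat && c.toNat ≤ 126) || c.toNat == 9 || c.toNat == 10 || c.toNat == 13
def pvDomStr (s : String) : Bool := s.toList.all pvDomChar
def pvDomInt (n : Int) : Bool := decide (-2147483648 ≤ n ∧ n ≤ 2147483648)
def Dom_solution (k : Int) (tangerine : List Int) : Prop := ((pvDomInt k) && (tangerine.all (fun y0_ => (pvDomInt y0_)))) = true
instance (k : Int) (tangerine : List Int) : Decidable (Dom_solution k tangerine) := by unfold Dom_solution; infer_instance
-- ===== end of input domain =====

-- B replaces the reverse sort of the frequency list by a counting-sort-style descending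
-- traversal of a frequency-of-frequencies table (alternative algorithm, same results).

-- ===== PORT A =====
-- 'for size in sizes: total += size; answer += 1; if total >= k: break'
def loopA (k : Int) : List Int → Int → Int → Int
  | [], _, answer => answer
  | s :: rest, total, answer =>
    if total + s ≥ k then answer + 1 else loopA k rest (total + s) (answer + 1)

def solution (k : Int) (tangerine : List Int) : Int :=
  let count := PySem.Dict.counter tangerine
  let sizes := PySem.List.sorted count.values (fun v => v) true
  loopA k sizes 0 0

-- ===== PORT B =====
-- 'for _ in range(m): total += f; answer += 1; if total >= k: return answer'
-- (inl = early return with the answer, inr = updated (total, answer) state)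
def innerB (k f : Int) : Nat → Int → Int → Sum Int (Int × Int)
  | 0, total, answer => .inr (total, answer)
  | n + 1, total, answer =>
    if total + f ≥ k then .inl (answer + 1)
    else innerB k f n (total + f) (answer + 1)

-- 'for f in range(maxf, 0, -1): …' — structural countdown on the Nat below f
def outerB (k : Int) (buckets : PySem.Dict Int Int) : Nat → Int → Int → Int
  | 0, _, answer => answer
  | fn + 1, total, answer =>
    match innerB k ((fn : Int) + 1) ((buckets.getD ((fn : Int) + 1) 0).toNat) total answer with
    | .inl ans => ans
    | .inr (t, a) => outerB k buckets fn t a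

def solution_alt (k : Int) (tangerine : List Int) : Int :=
  let count := tangerine.foldl (fun d t => d.insert t (d.getD t 0 + 1)) PySem.Dict.empty
  match PySem.List.max? count.values (fun v => v) with
  | none => 0    -- 'if not count: return 0'
  | some m =>
    let buckets := count.values.foldl (fun d c => d.insert c (d.getD c 0 + 1)) PySem.Dict.empty
    outerB k buckets m.toNat 0 0

-- ===== PRECONDITION & SPEC =====
def Spec_solution (k : Int) (tangerine : List Int) (out : Int) : Prop := out = solution_alt k tangerine
instance (k : Int) (tangerine : List Int) (out : Int) : Decidable (Spec_solution k tangerine out) := by unfold Spec_solution; infer_instance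

-- ===== CLAIM (what is proved, stated in full; the proofs are below) =====
def Claim_equal_solution : Prop := ∀ (k : Int) (tangerine : List Int), Dom_solution k tangerine → Spec_solution k tangerine (solution k tangerine)

-- ===== LEMMAS AND PROOFS =====

-- the descending multiset B traverses: replicate (buckets[f]) f for f = fn, fn-1, …, 1
def flatten (buckets : PySem.Dict Int Int) : Nat → List Int
  | 0 => []
  | fn + 1 => List.replicate ((buckets.getD ((fn : Int) + 1) 0).toNat) ((fn : Int) + 1) ++ flatten buckets fn

theorem loopA_replicate (k f : Int) (n : Nat) :
    ∀ (rest : List Int) (t a : Int),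
      loopA k (List.replicate n f ++ rest) t a =
        match innerB k f n t a with
        | .inl r => r
        | .inr (t', a') => loopA k rest t' a' := by
  induction n with
  | zero => intro rest t a; simp [innerB]
  | succ n ih =>
    intro rest t a
    simp only [List.replicate_succ, List.cons_append, loopA, innerB]
    split
    · rfl
    · exact ih rest (t + f) (a + 1)

theorem outerB_eq_loopA_flatten (k : Int) (buckets : PySem.Dict Int Int) (fn : Nat) :
    ∀ (t a : Int), outerB k buckets fn t a = loopA k (flatten buckets fn) t a := by
  induction fn with
  | zero => intro t a; rfl
  | succ fn ih =>
    intro t a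
    simp only [outerB, flatten, loopA_replicate]
    cases h : innerB k ((fn : Int) + 1) ((buckets.getD ((fn : Int) + 1) 0).toNat) t a with
    | inl r => rfl
    | inr p => exact ih p.1 p.2

theorem mem_flatten_bound (buckets : PySem.Dict Int Int) (fn : Nat) :
    ∀ x ∈ flatten buckets fn, 1 ≤ x ∧ x ≤ (fn : Int) := by
  induction fn with
  | zero => intro x hx; simp [flatten] at hx
  | succ fn ih =>
    intro x hx
    simp only [flatten, List.mem_append, List.mem_replicate] at hx
    rcases hx with ⟨-, rfl⟩ | hx
    · constructor <;> omega
    · have := ih x hx; push_cast; omega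

theorem count_flatten (buckets : PySem.Dict Int Int) (fn : Nat) (x : Int) :
    (flatten buckets fn).count x =
      if 1 ≤ x ∧ x ≤ (fn : Int) then (buckets.getD x 0).toNat else 0 := by
  induction fn with
  | zero => simp [flatten]; omega
  | succ fn ih =>
    simp only [flatten, List.count_append, ih, List.count_replicate]
    by_cases hx : x = (fn : Int) + 1
    · subst hx
      have h1 : ¬ ((fn : Int) + 1 ≤ (fn : Int)) := by omega
      simp [h1]
    · have hne : ¬ ((fn : Int) + 1 == x) = true := by simp [beq_iff_eq]; omega
      simp only [hne]
      rcases Int.lt_or_lt_of_ne hx with h | h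
      · by_cases h1 : 1 ≤ x ∧ x ≤ (fn : Int)
        · have h2 : 1 ≤ x ∧ x ≤ (fn : Int) + 1 := by omega
          simp [h1, h2]
        · have h2 : ¬ (1 ≤ x ∧ x ≤ (fn : Int) + 1) := by omega
          simp [h1, h2]
      · have h1 : ¬ (1 ≤ x ∧ x ≤ (fn : Int)) := by omega
        have h2 : ¬ (1 ≤ x ∧ x ≤ (fn : Int) + 1) := by omega
        simp [h1, h2]

theorem pairwise_flatten (buckets : PySem.Dict Int Int) (fn : Nat) :
    (flatten buckets fn).Pairwise (fun a b => b ≤ a) := by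
  induction fn with
  | zero => simp [flatten]
  | succ fn ih =>
    simp only [flatten]
    refine List.pairwise_append.mpr ⟨List.pairwise_replicate.mpr (Or.inr (le_refl _)), ih, ?_⟩
    · intro a ha b hb
      rcases List.mem_replicate.mp ha with ⟨-, rfl⟩
      have := mem_flatten_bound buckets fn b hb
      omega

-- every value of a Counter is the count of its key, hence positive
theorem counter_values_pos (xs : List Int) :
    ∀ v ∈ (PySem.Dict.counter xs).values, 1 ≤ v := by
  intro v hv
  rw [PySem.Dict.values_eq_map_keys _ (PySem.Dict.nodup_keys_counter xs) 0] at hv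
  rcases List.mem_map.mp hv with ⟨key, hkey, rfl⟩
  rw [PySem.Dict.getD_counter]
  rw [PySem.Dict.keys_counter] at hkey
  have hmem : key ∈ xs := (PySem.Set.mem_ofList _ _).mp hkey
  have : 0 < xs.count key := List.count_pos_iff.mpr hmem
  omega

-- counts of a Counter, as a Nat
theorem counter_getD_toNat (xs : List Int) (x : Int) :
    ((PySem.Dict.counter xs).getD x 0).toNat = xs.count x := by
  rw [PySem.Dict.getD_counter]; exact Int.toNat_natCast _

-- the flattened bucket traversal IS the reverse-sorted value list
theorem flatten_eq_sorted (V : List Int) (m : Int)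
    (hmax : PySem.List.max? V (fun v => v) = some m)
    (hpos : ∀ v ∈ V, 1 ≤ v) :
    PySem.List.sorted V (fun v => v) true = flatten (PySem.Dict.counter V) m.toNat := by
  have hub : ∀ v ∈ V, v ≤ m := PySem.List.max?_isMax hmax
  have hm1 : 1 ≤ m := hpos m (PySem.List.max?_mem hmax)
  have hmt : ((m.toNat : Int)) = m := Int.toNat_of_nonneg (by omega)
  have hperm : (flatten (PySem.Dict.counter V) m.toNat).Perm V := by
    rw [List.perm_iff_count]
    intro x
    rw [count_flatten, counter_getD_toNat, hmt]
    by_cases hx : 1 ≤ x ∧ x ≤ m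
    · simp [hx]
    · have hnot : x ∉ V := by
        intro hmem
        exact hx ⟨hpos x hmem, hub x hmem⟩
      simp [hx, List.count_eq_zero.mpr hnot]
  have hs : (PySem.List.sorted V (fun v => v) true).Perm (flatten (PySem.Dict.counter V) m.toNat) :=
    (PySem.List.sorted_perm V _ true).trans hperm.symm
  exact List.Perm.eq_of_pairwise (fun a b _ _ h1 h2 => le_antisymm h2 h1)
    (PySem.List.sorted_pairwise_rev V (fun v => v)) (pairwise_flatten _ _) hs

-- zeta-free readings of the two ports (both definitional)
theorem solution_eq (k : Int) (t : List Int) :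
    solution k t =
      loopA k (PySem.List.sorted (PySem.Dict.counter t).values (fun v => v) true) 0 0 := rfl

theorem solution_alt_eq (k : Int) (t : List Int) :
    solution_alt k t =
      match PySem.List.max? (PySem.Dict.counter t).values (fun v => v) with
      | none => 0
      | some m => outerB k (PySem.Dict.counter (PySem.Dict.counter t).values) m.toNat 0 0 := rfl

-- ===== VERDICT (by name: the statement is the Claim_ definition above) =====
theorem solution_spec : Claim_equal_solution := by
  intro k tangerine _
  unfold Spec_solution
  rw [solution_eq, solution_alt_eq]
  cases hmax : PySem.List.max? (PySem.Dict.counter tangerine).values (fun v => v) with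
  | none =>
    rw [(PySem.List.max?_eq_none_iff _ _).mp hmax]
    rfl
  | some m =>
    rw [flatten_eq_sorted _ m hmax (counter_values_pos tangerine),
        ← outerB_eq_loopA_flatten]
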